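-- pv_equiv track=rewrite | github.com/j-kroon/HackerRank | hacker/strings.py | doormat
-- ===== SOURCE A (Python) =====
-- def doormat(n, m):
--     """
--     Mat size must be n * m. ( is an odd natural number, and  is  times .)
--     The design should have 'WELCOME' written in the center.
--     The design pattern should only use |, . and - characters.
--     :param m:
--     :param n:
--     :return:
--     """
--     pad = '-'
--     filler = '.|.'
--     middle = 'WELCOME'
--     mat = []
--     mid = middle.center(m, pad)
--     error = 'Oops, try again!'
--
--     try:
--         for width in range(1, n, 2):
--             mat.append((filler*width).center(m, pad))
--         end = list(reversed(mat))
--         mat.append(mid)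
--         mat = mat + end
--         return '\n'.join(mat)
--     except TypeError:
--         return error
-- ===== SOURCE B (Python) =====
-- def doormat(n, m):
--     try:
--         k = len(range(1, n, 2))
--     except TypeError:
--         return 'Oops, try again!'
--     rows = []
--     for j in range(2*k+1):
--         if j == k:
--             rows.append('WELCOME'.center(m, '-'))
--         else:
--             rows.append(('.|.' * (2*min(j, 2*k-j)+1)).center(m, '-'))
--     return '\n'.join(rows)
-- ===== Notes on version B (the rewrite author's own statement) =====
-- stated objective: alternative
-- what changed: B computes the row count k once and generates every row directly from a single index j via width 2*min(j,2k-j)+1, instead of building the top half in a list, reversing a copy and concatenating three lists.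
import Mathlib
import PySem

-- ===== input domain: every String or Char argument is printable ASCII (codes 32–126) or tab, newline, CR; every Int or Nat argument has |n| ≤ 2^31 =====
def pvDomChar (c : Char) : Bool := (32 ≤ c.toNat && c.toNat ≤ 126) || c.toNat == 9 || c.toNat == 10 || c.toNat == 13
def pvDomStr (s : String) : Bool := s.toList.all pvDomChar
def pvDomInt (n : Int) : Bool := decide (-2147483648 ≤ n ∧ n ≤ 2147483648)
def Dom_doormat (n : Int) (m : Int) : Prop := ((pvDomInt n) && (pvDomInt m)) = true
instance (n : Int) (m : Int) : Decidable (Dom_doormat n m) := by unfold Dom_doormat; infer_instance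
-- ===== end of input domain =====

-- B single-pass row-generation instead of A's build-half / reverse / concatenate; alternative decomposition, same cost.
-- On Int arguments A's TypeError branch is unreachable, so both ports are total and no Pre_ is needed.

-- shared helper: Python str.center(w, '-') on code points (exact: CPython puts the extra pad char
-- computed by left = marg//2 + (marg & w & 1); for w ≤ len(s) it returns s unchanged)
def pvCenter (s : List Char) (w : Int) : List Char :=
  if w ≤ (s.length : Int) then s
  else
    let wn := w.toNat
    let marg := wn - s.length
    let left := marg / 2 + (marg &&& wn &&& 1)
    List.replicate left '-' ++ s ++ List.replicate (marg - left) '-'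

-- shared helper: Python 's * k' (string repetition; k ≤ 0 gives '')
def pvRepeat (s : List Char) (k : Int) : List Char := (List.replicate k.toNat s).flatten

-- ===== PORT A =====
def doormat (n : Int) (m : Int) : String :=
  let mid := pvCenter "WELCOME".toList m
  let mat := (PySem.List.pyRange 1 n 2).foldl
      (fun acc width => acc ++ [pvCenter (pvRepeat ".|.".toList width) m]) []
  let endL := mat.reverse
  let mat := mat ++ [mid]
  let mat := mat ++ endL
  String.ofList (PySem.Chars.join ['\n'] mat)

-- ===== PORT B =====
def doormat_alt (n : Int) (m : Int) : String :=
  let k : Int := (PySem.List.pyRange 1 n 2).length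
  let rows := (PySem.List.pyRange 0 (2*k+1) 1).map (fun j =>
    if j = k then pvCenter "WELCOME".toList m
    else pvCenter (pvRepeat ".|.".toList (2 * min j (2*k - j) + 1)) m)
  String.ofList (PySem.Chars.join ['\n'] rows)

-- ===== PRECONDITION & SPEC =====
def Spec_doormat (n : Int) (m : Int) (out : String) : Prop := out = doormat_alt n m
instance (n : Int) (m : Int) (out : String) : Decidable (Spec_doormat n m out) := by unfold Spec_doormat; infer_instance

-- ===== CLAIM (what is proved, stated in full; the proofs are below) =====
def Claim_equal_doormat : Prop := ∀ (n : Int) (m : Int), Dom_doormat n m → Spec_doormat n m (doormat n m)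

-- ===== LEMMAS AND PROOFS =====

-- A's append-into-accumulator loop is map
theorem pv_foldl_append_map {α β : Type} (f : α → β) (l : List α) (acc : List β) :
    l.foldl (fun a x => a ++ [f x]) acc = acc ++ l.map f := by
  induction l generalizing acc with
  | nil => simp
  | cons x xs ih => simp [List.foldl_cons, ih]

-- range reversed, pointwise
theorem pv_reverse_range_map {β : Type} (k : Nat) (f : Nat → β) :
    ((List.range k).map f).reverse = (List.range k).map (fun j => f (k - 1 - j)) := by
  apply List.ext_getElem
  · simp
  · intro i h1 h2
    simp [List.getElem_reverse]

theorem pv_rows_eq (n m : Int) :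
    ((PySem.List.pyRange 0 (2*((PySem.List.pyRange 1 n 2).length : Int)+1) 1).map (fun j =>
        if j = ((PySem.List.pyRange 1 n 2).length : Int) then pvCenter "WELCOME".toList m
        else pvCenter (pvRepeat ".|.".toList
          (2 * min j (2*((PySem.List.pyRange 1 n 2).length : Int) - j) + 1)) m)) =
    ((PySem.List.pyRange 1 n 2).map (fun w => pvCenter (pvRepeat ".|.".toList w) m)
      ++ [pvCenter "WELCOME".toList m])
      ++ ((PySem.List.pyRange 1 n 2).map (fun w => pvCenter (pvRepeat ".|.".toList w) m)).reverse := by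
  obtain ⟨K, hK⟩ : ∃ K : Nat,
      PySem.List.pyRange 1 n 2 = (List.range K).map (fun k : Nat => 1 + 2 * (k : Int)) :=
    ⟨_, @PySem.List.pyRange_of_pos 1 n 2 (by norm_num)⟩
  have hlen : (PySem.List.pyRange 1 n 2).length = K := by simp [hK]
  rw [hlen]
  have h01 : PySem.List.pyRange 0 (2*(K:Int)+1) 1 = (List.range (2*K+1)).map (fun j : Nat => (j : Int)) := by
    rw [PySem.List.pyRange_one]
    rw [show ((2*(K:Int)+1 - 0)).toNat = 2*K+1 by omega]
    exact List.map_congr_left (fun j _ => by simp)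
  rw [h01, List.map_map, hK, List.map_map]
  rw [show 2*K+1 = (K+1)+K by omega, List.range_add, List.range_succ]
  simp only [List.map_append, List.map_map, List.map_cons, List.map_nil]
  rw [pv_reverse_range_map]
  rw [List.append_assoc, List.append_assoc]
  congr 1
  · -- top half: j < K picks width 2j+1 = (1 + 2j)
    apply List.map_congr_left
    intro j hj
    simp only [List.mem_range] at hj
    have hne : ((j : Int)) ≠ (K : Int) := by exact_mod_cast Nat.ne_of_lt hj
    simp only [Function.comp_apply, if_neg hne]
    congr 2
    omega
  congr 1
  · -- middle row
    simp
  · -- bottom half: j = K+1+i picks width 2(K-1-i)+1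
    apply List.map_congr_left
    intro j hj
    simp only [List.mem_range] at hj
    simp only [Function.comp_apply]
    rw [if_neg (by push_cast; omega)]
    congr 2
    push_cast
    omega

-- ===== VERDICT (by name: the statement is the Claim_ definition above) =====
theorem doormat_spec : Claim_equal_doormat := by
  intro n m _
  show doormat n m = doormat_alt n m
  simp only [doormat, doormat_alt]
  rw [pv_foldl_append_map]
  rw [pv_rows_eq n m]
  simp [List.append_assoc]
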